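-- pv_equiv track=rewrite | github.com/Juanzitooh/estudo_enem | scripts/extrair_banco_enem_real.py | infer_area
-- ===== SOURCE A (Python) =====
-- def infer_area(
--     year: int,
--     day: int,
--     question_number: int,
--     area_order: tuple[str, str] | None = None,
--     area_ranges: list[tuple[int, int, str]] | None = None,
-- ) -> str:
--     if area_ranges:
--         for start, end, area_name in area_ranges:
--             if start <= question_number <= end:
--                 return area_name
--
--     if area_order:
--         if 1 <= question_number <= 45 or 91 <= question_number <= 135:
--             return area_order[0]
--         if 46 <= question_number <= 90 or 136 <= question_number <= 180:
--             return area_order[1]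
--
--     if year <= 2016:
--         if day == 1:
--             if 1 <= question_number <= 45:
--                 return "Ciências Humanas"
--             if 46 <= question_number <= 90:
--                 return "Ciências da Natureza"
--         if day == 2:
--             if 91 <= question_number <= 135:
--                 return "Linguagens"
--             if 136 <= question_number <= 180:
--                 return "Matemática"
--     else:
--         if day == 1:
--             if 1 <= question_number <= 45:
--                 return "Linguagens"
--             if 46 <= question_number <= 90:
--                 return "Ciências Humanas"
--         if day == 2:
--             if 91 <= question_number <= 135:
--                 return "Ciências da Natureza"
--             if 136 <= question_number <= 180:
--                 return "Matemática"
--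
--     return "Área não identificada"
-- ===== SOURCE B (Python) =====
-- def infer_area(
--     year: int,
--     day: int,
--     question_number: int,
--     area_order: tuple[str, str] | None = None,
--     area_ranges: list[tuple[int, int, str]] | None = None,
-- ) -> str:
--     # Build one ordered table of (start, end, name) tiers, then scan it once.
--     table = list(area_ranges or [])
--     if area_order:
--         first, second = area_order
--         table += [(1, 45, first), (91, 135, first),
--                   (46, 90, second), (136, 180, second)]
--     if year <= 2016:
--         names = ("Ciências Humanas", "Ciências da Natureza", "Linguagens", "Matemática")
--     else:
--         names = ("Linguagens", "Ciências Humanas", "Ciências da Natureza", "Matemática")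
--     if day == 1:
--         table += [(1, 45, names[0]), (46, 90, names[1])]
--     elif day == 2:
--         table += [(91, 135, names[2]), (136, 180, names[3])]
--     return next((name for start, end, name in table
--                  if start <= question_number <= end),
--                 "Área não identificada")
-- ===== Notes on version B (the rewrite author's own statement) =====
-- stated objective: simpler
-- what changed: Replaces the nested if/elif fall-through chains with one ordered (start, end, name) table built from the three tiers (explicit ranges, area_order, year/day defaults) and a single first-match scan over it.
import Mathlib
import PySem

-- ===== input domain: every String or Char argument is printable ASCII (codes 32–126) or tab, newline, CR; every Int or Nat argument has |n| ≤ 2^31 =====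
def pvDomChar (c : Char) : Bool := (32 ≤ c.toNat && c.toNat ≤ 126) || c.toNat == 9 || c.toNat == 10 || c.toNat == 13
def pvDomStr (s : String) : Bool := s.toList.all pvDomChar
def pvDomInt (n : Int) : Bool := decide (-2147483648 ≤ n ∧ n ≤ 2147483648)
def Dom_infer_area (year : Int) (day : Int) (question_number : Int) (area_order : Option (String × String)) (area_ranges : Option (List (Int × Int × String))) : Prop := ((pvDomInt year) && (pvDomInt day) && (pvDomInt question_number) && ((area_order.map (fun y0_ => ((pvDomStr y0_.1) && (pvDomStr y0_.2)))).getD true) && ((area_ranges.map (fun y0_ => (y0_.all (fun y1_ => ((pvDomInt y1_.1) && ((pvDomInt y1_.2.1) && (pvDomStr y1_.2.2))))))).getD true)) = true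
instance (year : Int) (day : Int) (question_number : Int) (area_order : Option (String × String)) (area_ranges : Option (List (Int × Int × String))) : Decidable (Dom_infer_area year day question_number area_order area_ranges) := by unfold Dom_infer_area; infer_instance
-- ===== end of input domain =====

-- B replaces A's nested if/elif fall-through chains by one ordered (start,end,name)
-- table built from the three tiers and a single first-match scan (objective: simpler).

-- ===== PORT A =====
-- the 'for start, end, area_name in area_ranges: if start <= q <= end: return' loop
def aRangeLoop (q : Int) : List (Int × Int × String) → Option String
  | [] => none
  | (s, e, n) :: rest => if s ≤ q ∧ q ≤ e then some n else aRangeLoop q rest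

-- the fall-through tail after the two early-return blocks (the year/day chains)
def aFallback (year : Int) (day : Int) (q : Int) : String :=
  if year ≤ 2016 then
    if day = 1 ∧ 1 ≤ q ∧ q ≤ 45 then "Ciências Humanas"
    else if day = 1 ∧ 46 ≤ q ∧ q ≤ 90 then "Ciências da Natureza"
    else if day = 2 ∧ 91 ≤ q ∧ q ≤ 135 then "Linguagens"
    else if day = 2 ∧ 136 ≤ q ∧ q ≤ 180 then "Matemática"
    else "Área não identificada"
  else
    if day = 1 ∧ 1 ≤ q ∧ q ≤ 45 then "Linguagens"
    else if day = 1 ∧ 46 ≤ q ∧ q ≤ 90 then "Ciências Humanas"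
    else if day = 2 ∧ 91 ≤ q ∧ q ≤ 135 then "Ciências da Natureza"
    else if day = 2 ∧ 136 ≤ q ∧ q ≤ 180 then "Matemática"
    else "Área não identificada"

-- the 'if area_order:' block with early returns, falling through to aFallback
def aOrderBlock (year : Int) (day : Int) (q : Int) (area_order : Option (String × String)) : String :=
  match area_order with
  | some (fst, snd) =>   -- a two-string tuple is always truthy in Python
    if (1 ≤ q ∧ q ≤ 45) ∨ (91 ≤ q ∧ q ≤ 135) then fst
    else if (46 ≤ q ∧ q ≤ 90) ∨ (136 ≤ q ∧ q ≤ 180) then snd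
    else aFallback year day q
  | none => aFallback year day q

def infer_area (year : Int) (day : Int) (question_number : Int) (area_order : Option (String × String)) (area_ranges : Option (List (Int × Int × String))) : String :=
  match area_ranges with
  | some l =>   -- 'if area_ranges:' — an empty list loops zero times, same fall-through
    match aRangeLoop question_number l with
    | some n => n
    | none => aOrderBlock year day question_number area_order
  | none => aOrderBlock year day question_number area_order

-- ===== PORT B =====
-- 'next((name for start, end, name in table if start <= q <= end), default)'
def bScan (q : Int) : List (Int × Int × String) → String
  | [] => "Área não identificada"
  | (s, e, n) :: rest => if s ≤ q ∧ q ≤ e then n else bScan q rest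

def infer_area_alt (year : Int) (day : Int) (question_number : Int) (area_order : Option (String × String)) (area_ranges : Option (List (Int × Int × String))) : String :=
  let table := area_ranges.getD []
  let table := table ++ (match area_order with
    | some (fst, snd) => [(1, 45, fst), (91, 135, fst), (46, 90, snd), (136, 180, snd)]
    | none => [])
  let names : String × String × String × String :=
    if year ≤ 2016 then ("Ciências Humanas", "Ciências da Natureza", "Linguagens", "Matemática")
    else ("Linguagens", "Ciências Humanas", "Ciências da Natureza", "Matemática")
  let table := table ++
    (if day = 1 then [(1, 45, names.1), (46, 90, names.2.1)]
     else if day = 2 then [(91, 135, names.2.2.1), (136, 180, names.2.2.2)]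
     else [])
  bScan question_number table

-- ===== PRECONDITION & SPEC =====
def Spec_infer_area (year : Int) (day : Int) (question_number : Int) (area_order : Option (String × String)) (area_ranges : Option (List (Int × Int × String))) (out : String) : Prop := out = infer_area_alt year day question_number area_order area_ranges
instance (year : Int) (day : Int) (question_number : Int) (area_order : Option (String × String)) (area_ranges : Option (List (Int × Int × String))) (out : String) : Decidable (Spec_infer_area year day question_number area_order area_ranges out) := by unfold Spec_infer_area; infer_instance

-- ===== CLAIM (what is proved, stated in full; the proofs are below) =====
def Claim_equal_infer_area : Prop := ∀ (year : Int) (day : Int) (question_number : Int) (area_order : Option (String × String)) (area_ranges : Option (List (Int × Int × String))), Dom_infer_area year day question_number area_order area_ranges → Spec_infer_area year day question_number area_order area_ranges (infer_area year day question_number area_order area_ranges)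

-- ===== LEMMAS AND PROOFS =====
-- scanning a concatenation: the left part wins, A's loop style
theorem bScan_append (q : Int) (l1 l2 : List (Int × Int × String)) :
    bScan q (l1 ++ l2) = (aRangeLoop q l1).getD (bScan q l2) := by
  induction l1 with
  | nil => rfl
  | cons h t ih =>
    obtain ⟨s, e, n⟩ := h
    by_cases hc : s ≤ q ∧ q ≤ e <;> simp [bScan, aRangeLoop, hc, ih]

-- the area_order tier of the table behaves like A's early-return block
theorem bScan_order (q : Int) (f s : String) (l2 : List (Int × Int × String)) :
    bScan q ([((1:Int), (45:Int), f), (91, 135, f), (46, 90, s), (136, 180, s)] ++ l2) =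
      (if (1 ≤ q ∧ q ≤ 45) ∨ (91 ≤ q ∧ q ≤ 135) then f
       else if (46 ≤ q ∧ q ≤ 90) ∨ (136 ≤ q ∧ q ≤ 180) then s
       else bScan q l2) := by
  simp only [List.cons_append, List.nil_append, bScan]
  split_ifs <;> first | rfl | omega

-- the year/day tier of the table behaves like A's fall-through chains
theorem bScan_day (year day q : Int) :
    bScan q
      (if day = 1 then
        [((1:Int), (45:Int),
           (if year ≤ 2016 then (("Ciências Humanas":String), ("Ciências da Natureza":String), ("Linguagens":String), ("Matemática":String)) else ("Linguagens", "Ciências Humanas", "Ciências da Natureza", "Matemática")).1),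
         (46, 90,
           (if year ≤ 2016 then (("Ciências Humanas":String), ("Ciências da Natureza":String), ("Linguagens":String), ("Matemática":String)) else ("Linguagens", "Ciências Humanas", "Ciências da Natureza", "Matemática")).2.1)]
       else if day = 2 then
        [((91:Int), (135:Int),
           (if year ≤ 2016 then (("Ciências Humanas":String), ("Ciências da Natureza":String), ("Linguagens":String), ("Matemática":String)) else ("Linguagens", "Ciências Humanas", "Ciências da Natureza", "Matemática")).2.2.1),
         (136, 180,
           (if year ≤ 2016 then (("Ciências Humanas":String), ("Ciências da Natureza":String), ("Linguagens":String), ("Matemática":String)) else ("Linguagens", "Ciências Humanas", "Ciências da Natureza", "Matemática")).2.2.2)]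
       else []) = aFallback year day q := by
  by_cases hy : year ≤ 2016 <;> by_cases h1 : day = 1 <;> by_cases h2 : day = 2 <;>
    simp [aFallback, hy, h1, h2, bScan]

-- the whole table scan equals A's tier-2 block (order tier then day tier)
theorem bScan_tiers (year day q : Int) (ao : Option (String × String)) :
    bScan q
      ((match ao with
        | some (fst, snd) => [((1:Int), (45:Int), fst), (91, 135, fst), (46, 90, snd), (136, 180, snd)]
        | none => []) ++
       (if day = 1 then
         [((1:Int), (45:Int),
            (if year ≤ 2016 then (("Ciências Humanas":String), ("Ciências da Natureza":String), ("Linguagens":String), ("Matemática":String)) else ("Linguagens", "Ciências Humanas", "Ciências da Natureza", "Matemática")).1),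
          (46, 90,
            (if year ≤ 2016 then (("Ciências Humanas":String), ("Ciências da Natureza":String), ("Linguagens":String), ("Matemática":String)) else ("Linguagens", "Ciências Humanas", "Ciências da Natureza", "Matemática")).2.1)]
        else if day = 2 then
         [((91:Int), (135:Int),
            (if year ≤ 2016 then (("Ciências Humanas":String), ("Ciências da Natureza":String), ("Linguagens":String), ("Matemática":String)) else ("Linguagens", "Ciências Humanas", "Ciências da Natureza", "Matemática")).2.2.1),
          (136, 180,
            (if year ≤ 2016 then (("Ciências Humanas":String), ("Ciências da Natureza":String), ("Linguagens":String), ("Matemática":String)) else ("Linguagens", "Ciências Humanas", "Ciências da Natureza", "Matemática")).2.2.2)]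
        else [])) = aOrderBlock year day q ao := by
  rcases ao with _ | ⟨f, s⟩
  · simpa only [List.nil_append, aOrderBlock] using bScan_day year day q
  · rw [bScan_order]
    simp only [aOrderBlock, bScan_day]

-- ===== VERDICT (by name: the statement is the Claim_ definition above) =====
theorem infer_area_spec : Claim_equal_infer_area := by
  intro year day q ao ar _
  unfold Spec_infer_area infer_area infer_area_alt
  rcases ar with _ | l
  · dsimp only
    rw [Option.getD_none, List.nil_append, bScan_tiers]
  · dsimp only
    rw [Option.getD_some, List.append_assoc, bScan_append, bScan_tiers]
    cases hA : aRangeLoop q l <;> rfl
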